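-- pv_equiv track=rewrite | github.com/Y4tacker/Web-Security | CommonlyUsedScripts/编码/Anynum.py | getNumber2
-- ===== SOURCE A (Python) =====
-- def getNumber2(number):
--     number = int(number)
--     if number in [-2, -1, 0, 1]:
--         return ["~({}<[])", "~([]<[])",
--                 "([]<[])", "({}<[])"][number + 2]
--
--     if number % 2:
--         return "~%s" % getNumber2(~number)
--     else:
--         return "(%s<<({}<[]))" % getNumber2(number / 2)
-- ===== SOURCE B (Python) =====
-- def getNumber2(number):
--     # Iterative: record the parity-driven operations, then fold them in
--     # reverse around the base-case literal.
--     number = int(number)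
--     ops = []
--     while number not in [-2, -1, 0, 1]:
--         if number % 2:
--             ops.append('odd')
--             number = ~number
--         else:
--             ops.append('even')
--             number = int(number / 2)
--     s = ["~({}<[])", "~([]<[])", "([]<[])", "({}<[])"][number + 2]
--     for op in reversed(ops):
--         s = "~%s" % s if op == 'odd' else "(%s<<({}<[]))" % s
--     return s
-- ===== Notes on version B (the rewrite author's own statement) =====
-- stated objective: alternative
-- what changed: Replaces the non-tail wrapping recursion with an iterative loop that records the parity-driven ops, then folds them in reverse around the base-case literal.
import Mathlib
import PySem

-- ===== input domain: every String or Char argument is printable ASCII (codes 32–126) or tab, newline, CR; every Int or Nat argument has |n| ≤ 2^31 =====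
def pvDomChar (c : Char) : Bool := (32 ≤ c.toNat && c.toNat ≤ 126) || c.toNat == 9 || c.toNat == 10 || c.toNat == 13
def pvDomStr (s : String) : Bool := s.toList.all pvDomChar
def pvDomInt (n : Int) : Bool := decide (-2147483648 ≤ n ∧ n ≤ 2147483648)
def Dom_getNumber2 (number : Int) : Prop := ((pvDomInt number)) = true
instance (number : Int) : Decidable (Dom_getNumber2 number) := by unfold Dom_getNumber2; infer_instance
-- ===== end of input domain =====

-- B re-implements the wrapping recursion as an explicit record-ops-then-fold loop
-- (objective: alternative decomposition, same asymptotic cost).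

-- termination measure shared by both ports' recursions
def pvMeas (n : Int) : Nat := n.natAbs + (if n % 2 ≠ 0 ∧ 3 ≤ n.natAbs then 2 else 0)

theorem pvMeas_odd (n : Int) (h : ¬(n = -2 ∨ n = -1 ∨ n = 0 ∨ n = 1))
    (ho : n % 2 ≠ 0) : pvMeas (-n - 1) < pvMeas n := by
  unfold pvMeas; split_ifs <;> omega

theorem pvMeas_even (n : Int) (h : ¬(n = -2 ∨ n = -1 ∨ n = 0 ∨ n = 1))
    (he : n % 2 = 0) : pvMeas (n / 2) < pvMeas n := by
  unfold pvMeas; split_ifs <;> omega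

theorem pvMod_two (n : Int) : PySem.Int.mod n 2 = n % 2 :=
  PySem.Int.mod_eq_emod_of_pos (by norm_num)

-- ===== PORT A =====
def getNumber2 (number : Int) : String :=
  if number = -2 ∨ number = -1 ∨ number = 0 ∨ number = 1 then
    -- four-element list indexed by number+2; in range here, so getD "" is exact
    (PySem.List.pyGet? ["~({}<[])", "~([]<[])", "([]<[])", "({}<[])"] (number + 2)).getD ""
  else if PySem.Int.mod number 2 ≠ 0 then
    "~" ++ getNumber2 (-number - 1)          -- ~number = -number-1
  else
    -- int(number / 2): number is even and |number| ≤ 2^31, so the float halving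
    -- is exact and int() truncation equals exact integer division
    "(" ++ getNumber2 (number / 2) ++ "<<({}<[]))"
termination_by pvMeas number
decreasing_by all_goals
  first
  | exact pvMeas_odd number (by tauto) (by simp only [pvMod_two] at *; omega)
  | exact pvMeas_even number (by tauto) (by simp only [pvMod_two] at *; omega)

-- ===== PORT B =====
-- the while loop: record 'odd'(true)/'even'(false) ops, return (ops, final number)
def pvLoop (number : Int) (ops : List Bool) : List Bool × Int :=
  if number = -2 ∨ number = -1 ∨ number = 0 ∨ number = 1 then
    (ops, number)
  else if PySem.Int.mod number 2 ≠ 0 then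
    pvLoop (-number - 1) (ops ++ [true])
  else
    pvLoop (number / 2) (ops ++ [false])     -- int(number/2): exact, number even
termination_by pvMeas number
decreasing_by all_goals
  first
  | exact pvMeas_odd number (by tauto) (by simp only [pvMod_two] at *; omega)
  | exact pvMeas_even number (by tauto) (by simp only [pvMod_two] at *; omega)

def getNumber2_alt (number : Int) : String :=
  let r := pvLoop number []
  let s0 := (PySem.List.pyGet? ["~({}<[])", "~([]<[])", "([]<[])", "({}<[])"] (r.2 + 2)).getD ""
  r.1.reverse.foldl (fun s op => if op then "~" ++ s else "(" ++ s ++ "<<({}<[]))") s0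

-- ===== PRECONDITION & SPEC =====
def Spec_getNumber2 (number : Int) (out : String) : Prop := out = getNumber2_alt number
instance (number : Int) (out : String) : Decidable (Spec_getNumber2 number out) := by unfold Spec_getNumber2; infer_instance

-- ===== CLAIM (what is proved, stated in full; the proofs are below) =====
def Claim_equal_getNumber2 : Prop := ∀ (number : Int), Dom_getNumber2 number → Spec_getNumber2 number (getNumber2 number)

-- ===== LEMMAS AND PROOFS =====

-- accumulator lemma: the ops list only grows at the tail
theorem pvLoop_acc (number : Int) (acc : List Bool) :
    pvLoop number acc = (acc ++ (pvLoop number []).1, (pvLoop number []).2) := by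
  conv_lhs => rw [pvLoop.eq_def]
  conv_rhs => rw [pvLoop.eq_def]
  split_ifs with h1 h2
  · simp
  · rw [pvLoop_acc (-number - 1) (acc ++ [true]), pvLoop_acc (-number - 1) ([] ++ [true])]
    simp
  · rw [pvLoop_acc (number / 2) (acc ++ [false]), pvLoop_acc (number / 2) ([] ++ [false])]
    simp
termination_by pvMeas number
decreasing_by all_goals
  first
  | exact pvMeas_odd number (by tauto) (by simp only [pvMod_two] at *; omega)
  | exact pvMeas_even number (by tauto) (by simp only [pvMod_two] at *; omega)

theorem getNumber2_eq_alt (number : Int) : getNumber2 number = getNumber2_alt number := by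
  simp only [getNumber2_alt]
  conv_lhs => rw [getNumber2.eq_def]
  conv_rhs => rw [pvLoop.eq_def]
  split_ifs with h1 h2
  · simp
  · rw [pvLoop_acc (-number - 1) ([] ++ [true]), getNumber2_eq_alt (-number - 1)]
    simp [getNumber2_alt, List.foldl_append]
  · rw [pvLoop_acc (number / 2) ([] ++ [false]), getNumber2_eq_alt (number / 2)]
    simp [getNumber2_alt, List.foldl_append]
termination_by pvMeas number
decreasing_by all_goals
  first
  | exact pvMeas_odd number (by tauto) (by simp only [pvMod_two] at *; omega)
  | exact pvMeas_even number (by tauto) (by simp only [pvMod_two] at *; omega)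

-- ===== VERDICT (by name: the statement is the Claim_ definition above) =====
theorem getNumber2_spec : Claim_equal_getNumber2 := by
  intro number _
  exact getNumber2_eq_alt number
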